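-- pv_equiv track=rewrite | github.com/jiho5755-maker/pressco21 | openclaw-project-hub/06_scripts/analyze-flora-mac-context.py | recommended_tasks
-- ===== SOURCE A (Python) =====
-- RESPONSE_MODES = {
--     "crm-operations": ["운영 이슈 진단", "인쇄/정산 흐름 점검", "배포 전 체크리스트"],
--     "makeshop-storefront": ["UI 수정 제안", "메이크샵 제약 검토", "상세페이지 분석"],
--     "partnerclass-platform": ["PRD 정리", "기능 우선순위 제안", "문서-구현 연결"],
--     "automation": ["워크플로우 분해", "자동화 후보 발굴", "운영 리스크 경보"],
--     "openclaw-ops": ["텔레그램 명령 설계", "코파일럿 운영정책", "에이전트 역할 분리"],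
--     "company-knowledge": ["회사 맥락 요약", "전략 일관성 검토", "대표 관점 의사결정 보조"],
-- }
--
-- def recommended_tasks(themes: list[str]) -> list[str]:
--     items: list[str] = []
--     for theme in themes:
--         items.extend(RESPONSE_MODES.get(theme, []))
--     unique: list[str] = []
--     for item in items:
--         if item not in unique:
--             unique.append(item)
--     return unique[:6]
-- ===== SOURCE B (Python) =====
-- RESPONSE_MODES = {
--     "crm-operations": ["운영 이슈 진단", "인쇄/정산 흐름 점검", "배포 전 체크리스트"],
--     "makeshop-storefront": ["UI 수정 제안", "메이크샵 제약 검토", "상세페이지 분석"],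
--     "partnerclass-platform": ["PRD 정리", "기능 우선순위 제안", "문서-구현 연결"],
--     "automation": ["워크플로우 분해", "자동화 후보 발굴", "운영 리스크 경보"],
--     "openclaw-ops": ["텔레그램 명령 설계", "코파일럿 운영정책", "에이전트 역할 분리"],
--     "company-knowledge": ["회사 맥락 요약", "전략 일관성 검토", "대표 관점 의사결정 보조"],
-- }
--
-- def recommended_tasks(themes: list[str]) -> list[str]:
--     # single fused pass: dedup via a seen-set, stop as soon as 6 tasks are collected
--     seen: set[str] = set()
--     result: list[str] = []
--     for theme in themes:
--         for task in RESPONSE_MODES.get(theme, []):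
--             if len(result) == 6:
--                 return result
--             if task not in seen:
--                 seen.add(task)
--                 result.append(task)
--     return result
-- ===== Notes on version B (the rewrite author's own statement) =====
-- stated objective: alternative
-- what changed: Replaces the flatten-then-dedup-then-truncate pipeline (three passes, list-scan dedup) by one fused pass that keeps a seen-set and returns early as soon as 6 tasks are collected.
import Mathlib
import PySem

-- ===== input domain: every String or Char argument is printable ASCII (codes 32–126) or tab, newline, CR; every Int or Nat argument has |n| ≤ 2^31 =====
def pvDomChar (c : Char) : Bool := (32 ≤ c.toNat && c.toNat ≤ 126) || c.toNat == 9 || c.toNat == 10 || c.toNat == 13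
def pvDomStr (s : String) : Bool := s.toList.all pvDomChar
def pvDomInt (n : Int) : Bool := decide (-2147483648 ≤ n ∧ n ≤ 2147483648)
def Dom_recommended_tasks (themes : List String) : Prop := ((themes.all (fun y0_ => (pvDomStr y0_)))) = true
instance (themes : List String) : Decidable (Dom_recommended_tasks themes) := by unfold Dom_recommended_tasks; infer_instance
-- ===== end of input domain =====

-- B replaces flatten-then-dedup-then-truncate by one fused early-terminating pass with a seen-set.

-- ===== PORT A =====
def pvModes : PySem.Dict String (List String) := PySem.Dict.ofList [
  ("crm-operations", ["운영 이슈 진단", "인쇄/정산 흐름 점검", "배포 전 체크리스트"]),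
  ("makeshop-storefront", ["UI 수정 제안", "메이크샵 제약 검토", "상세페이지 분석"]),
  ("partnerclass-platform", ["PRD 정리", "기능 우선순위 제안", "문서-구현 연결"]),
  ("automation", ["워크플로우 분해", "자동화 후보 발굴", "운영 리스크 경보"]),
  ("openclaw-ops", ["텔레그램 명령 설계", "코파일럿 운영정책", "에이전트 역할 분리"]),
  ("company-knowledge", ["회사 맥락 요약", "전략 일관성 검토", "대표 관점 의사결정 보조"])]

def recommended_tasks (themes : List String) : List String :=
  let items := themes.foldl (fun acc theme => acc ++ (pvModes.getD theme [])) []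
  let unique := items.foldl (fun u item => if item ∈ u then u else u ++ [item]) []
  PySem.List.slice unique none (some 6)

-- ===== PORT B =====
-- inner 'for task in …' loop; returns (seen, result, earlyReturn?)
def pvGoTasks : List String → PySem.Set String → List String → (PySem.Set String × List String × Bool)
  | [], seen, result => (seen, result, false)
  | t :: ts, seen, result =>
    if result.length == 6 then (seen, result, true)
    else if PySem.Set.contains seen t then pvGoTasks ts seen result
    else pvGoTasks ts (PySem.Set.add seen t) (result ++ [t])

-- outer 'for theme in themes' loop
def pvGoThemes : List String → PySem.Set String → List String → List String
  | [], _, result => result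
  | th :: ths, seen, result =>
    match pvGoTasks (pvModes.getD th []) seen result with
    | (s, r, done) => if done then r else pvGoThemes ths s r

def recommended_tasks_alt (themes : List String) : List String :=
  pvGoThemes themes PySem.Set.empty []

-- ===== PRECONDITION & SPEC =====
def Spec_recommended_tasks (themes : List String) (out : List String) : Prop := out = recommended_tasks_alt themes
instance (themes : List String) (out : List String) : Decidable (Spec_recommended_tasks themes out) := by unfold Spec_recommended_tasks; infer_instance

-- ===== CLAIM (what is proved, stated in full; the proofs are below) =====
def Claim_equal_recommended_tasks : Prop := ∀ (themes : List String), Dom_recommended_tasks themes → Spec_recommended_tasks themes (recommended_tasks themes)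

-- ===== LEMMAS AND PROOFS =====

-- A's dedup loop, with an explicit accumulator
def pvDD (xs u : List String) : List String :=
  xs.foldl (fun u item => if item ∈ u then u else u ++ [item]) u

lemma pvDD_nil (u : List String) : pvDD [] u = u := rfl

lemma pvDD_cons (t : String) (ts u : List String) :
    pvDD (t :: ts) u = pvDD ts (if t ∈ u then u else u ++ [t]) := rfl

lemma pvDD_append (a b u : List String) : pvDD (a ++ b) u = pvDD b (pvDD a u) := by
  simp [pvDD, List.foldl_append]

lemma pvDD_prefix (xs : List String) : ∀ u, u <+: pvDD xs u := by
  induction xs with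
  | nil => intro u; simp [pvDD_nil]
  | cons t ts ih =>
    intro u
    rw [pvDD_cons]
    split
    · exact ih u
    · exact List.IsPrefix.trans (List.prefix_append u [t]) (ih (u ++ [t]))

lemma take_prefix_of_le {u v : List String} (h : u <+: v) (hl : 6 ≤ u.length) :
    v.take 6 = u.take 6 := by
  obtain ⟨s, rfl⟩ := h
  rw [List.take_append]
  simp [Nat.sub_eq_zero_of_le hl]

lemma take_pvDD_of_len {u : List String} (xs : List String) (h : u.length = 6) :
    (pvDD xs u).take 6 = u := by
  rw [take_prefix_of_le (pvDD_prefix xs u) (by omega), List.take_of_length_le (by omega)]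

-- spec of the inner loop
lemma pvGoTasks_spec (tasks : List String) : ∀ (seen : PySem.Set String) (result : List String),
    (∀ x, PySem.Set.contains seen x = true ↔ x ∈ result) → result.length ≤ 6 →
    (pvGoTasks tasks seen result).2.1 = (pvDD tasks result).take 6 ∧
    ((pvGoTasks tasks seen result).2.2 = true → (pvGoTasks tasks seen result).2.1.length = 6) ∧
    ((pvGoTasks tasks seen result).2.2 = false →
      (pvGoTasks tasks seen result).2.1 = pvDD tasks result ∧
      (∀ x, PySem.Set.contains (pvGoTasks tasks seen result).1 x = true
          ↔ x ∈ (pvGoTasks tasks seen result).2.1) ∧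
      (pvGoTasks tasks seen result).2.1.length ≤ 6) := by
  induction tasks with
  | nil =>
    intro seen result hinv hlen
    refine ⟨?_, by simp [pvGoTasks], ?_⟩
    · simp [pvGoTasks, pvDD_nil, List.take_of_length_le hlen]
    · intro _; exact ⟨by simp [pvGoTasks, pvDD_nil], hinv, hlen⟩
  | cons t ts ih =>
    intro seen result hinv hlen
    by_cases h6 : result.length = 6
    · have : pvGoTasks (t :: ts) seen result = (seen, result, true) := by
        simp [pvGoTasks, h6]
      rw [this]
      exact ⟨(take_pvDD_of_len (t :: ts) h6).symm, fun _ => h6, by simp⟩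
    · have hne : (result.length == 6) = false := by simp [h6]
      by_cases hmem : t ∈ result
      · have hms : t ∈ (seen : List String) := (PySem.Set.contains_iff seen t).mp ((hinv t).mpr hmem)
        have hstep : pvGoTasks (t :: ts) seen result = pvGoTasks ts seen result := by
          simp [pvGoTasks, hne, hms]
        rw [hstep, pvDD_cons, if_pos hmem]
        exact ih seen result hinv hlen
      · have hms : t ∉ (seen : List String) := fun h =>
          hmem ((hinv t).mp ((PySem.Set.contains_iff seen t).mpr h))
        have hstep : pvGoTasks (t :: ts) seen result
            = pvGoTasks ts (PySem.Set.add seen t) (result ++ [t]) := by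
          simp [pvGoTasks, hne, hms]
        have hadd : PySem.Set.add seen t = (seen : List String) ++ [t] := by
          simp [PySem.Set.add, hms]
        have hinv' : ∀ x, PySem.Set.contains (PySem.Set.add seen t) x = true
            ↔ x ∈ result ++ [t] := by
          intro x
          rw [PySem.Set.contains_iff, hadd]
          simp only [List.mem_append, List.mem_singleton]
          rw [← PySem.Set.contains_iff, hinv x]
        rw [hstep, pvDD_cons, if_neg hmem]
        exact ih (PySem.Set.add seen t) (result ++ [t]) hinv' (by simp; omega)

-- the flattened task stream
def pvFlat (ths : List String) : List String := ths.flatMap (fun th => pvModes.getD th [])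

-- spec of the outer loop
lemma pvGoThemes_spec (ths : List String) : ∀ (seen : PySem.Set String) (result : List String),
    (∀ x, PySem.Set.contains seen x = true ↔ x ∈ result) → result.length ≤ 6 →
    pvGoThemes ths seen result = (pvDD (pvFlat ths) result).take 6 := by
  induction ths with
  | nil =>
    intro seen result _ hlen
    simp [pvGoThemes, pvFlat, pvDD_nil, List.take_of_length_le hlen]
  | cons th ths ih =>
    intro seen result hinv hlen
    obtain ⟨hr, hdone, hnot⟩ := pvGoTasks_spec (pvModes.getD th []) seen result hinv hlen
    have hflat : pvFlat (th :: ths) = pvModes.getD th [] ++ pvFlat ths := by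
      simp [pvFlat]
    rw [hflat, pvDD_append]
    rcases hcall : pvGoTasks (pvModes.getD th []) seen result with ⟨s, r, done⟩
    rw [hcall] at hr hdone hnot
    simp only at hr hdone hnot
    cases done with
    | true =>
      have h6 : r.length = 6 := hdone rfl
      have hpre : pvDD (pvModes.getD th []) result <+: pvDD (pvFlat ths) (pvDD (pvModes.getD th []) result) :=
        pvDD_prefix _ _
      have hX : 6 ≤ (pvDD (pvModes.getD th []) result).length := by
        by_contra h
        rw [List.take_of_length_le (by omega)] at hr
        have := congrArg List.length hr
        omega
      have : pvGoThemes (th :: ths) seen result = r := by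
        simp [pvGoThemes, hcall]
      rw [this, take_prefix_of_le hpre hX]
      exact hr
    | false =>
      obtain ⟨hrr, hinv', hlen'⟩ := hnot rfl
      have : pvGoThemes (th :: ths) seen result = pvGoThemes ths s r := by
        simp [pvGoThemes, hcall]
      rw [this, ih s r hinv' hlen', hrr]

-- ===== VERDICT (by name: the statement is the Claim_ definition above) =====
theorem recommended_tasks_spec : Claim_equal_recommended_tasks := by
  intro themes _
  unfold Spec_recommended_tasks recommended_tasks recommended_tasks_alt
  have hitems : themes.foldl (fun acc theme => acc ++ (pvModes.getD theme [])) [] = pvFlat themes := by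
    rw [PySem.List.foldl_append_eq_flatMap]
    rfl
  have hslice : ∀ u : List String, PySem.List.slice u none (some 6) = u.take 6 := by
    intro u
    rw [PySem.List.slice_to u (by norm_num)]
    rfl
  have hinv0 : ∀ x : String, PySem.Set.contains (PySem.Set.empty : PySem.Set String) x = true ↔ x ∈ ([] : List String) := by
    intro x
    simp [PySem.Set.empty]
  rw [pvGoThemes_spec themes PySem.Set.empty [] hinv0 (by simp), hitems, hslice]
  rfl
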